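-- pv_equiv track=rewrite | github.com/WYGNG/USTC_SSE_Python | Python语言程序设计（梁勇）/evennumberedexercise/Exercise16_16.py | getRightmostLowestPoint
-- ===== SOURCE A (Python) =====
-- def getRightmostLowestPoint(p):
--     rightMostIndex = 0;
--     rightMostX = p[0][0];
--     rightMostY = p[0][1];
--
--     for i in range(1, len(p)):
--         if rightMostY > p[i][1]:
--             rightMostY = p[i][1]
--             rightMostX = p[i][0]
--             rightMostIndex = i
--         elif rightMostY == p[i][1] and rightMostX < p[i][0]:
--             rightMostX = p[i][0]
--             rightMostIndex = i
--
--     return p[rightMostIndex]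
-- ===== SOURCE B (Python) =====
-- def getRightmostLowestPoint(p):
--     return sorted(p, key=lambda pt: (pt[1], -pt[0]))[0]
-- ===== Notes on version B (the rewrite author's own statement) =====
-- stated objective: simpler
-- what changed: Replaces the hand-written selection loop over indices (tracking index, x and y separately) by a stable sort on the key (y, -x) and taking the first element of the sorted view.
import Mathlib
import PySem

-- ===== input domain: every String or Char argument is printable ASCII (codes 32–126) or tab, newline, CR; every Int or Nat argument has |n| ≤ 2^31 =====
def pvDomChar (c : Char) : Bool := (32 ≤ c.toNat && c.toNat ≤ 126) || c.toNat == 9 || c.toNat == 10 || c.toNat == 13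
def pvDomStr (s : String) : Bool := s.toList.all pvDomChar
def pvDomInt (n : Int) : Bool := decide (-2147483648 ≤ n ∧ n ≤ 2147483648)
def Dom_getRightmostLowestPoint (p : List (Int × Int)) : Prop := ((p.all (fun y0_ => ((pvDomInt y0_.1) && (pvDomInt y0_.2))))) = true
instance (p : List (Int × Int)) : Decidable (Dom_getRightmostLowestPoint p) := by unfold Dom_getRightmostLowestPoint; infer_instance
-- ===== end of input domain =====

-- B replaces A's hand-written index-tracking selection loop by a stable sort on key (y, -x) and taking the first element (simpler).


-- ===== PORT A =====
-- A's loop body: p[i] is read via pyGetD (index provably in range on every loop iteration; the default is never used inside Pre_).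
def pvStepA (p : List (Int × Int)) (st : Int × Int × Int) (i : Int) : Int × Int × Int :=
  let pi := PySem.List.pyGetD p i (0, 0)
  if st.2.2 > pi.2 then (i, pi.1, pi.2)
  else if st.2.2 = pi.2 ∧ st.2.1 < pi.1 then (i, pi.1, st.2.2)
  else st

def getRightmostLowestPoint (p : List (Int × Int)) : Int × Int :=
  let r := (PySem.List.pyRange 1 (PySem.List.len p)).foldl (pvStepA p)
    (0, (PySem.List.pyGetD p 0 (0, 0)).1, (PySem.List.pyGetD p 0 (0, 0)).2)
  PySem.List.pyGetD p r.1 (0, 0)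

-- ===== PORT B =====
def getRightmostLowestPoint_alt (p : List (Int × Int)) : Int × Int :=
  PySem.List.pyGetD (PySem.List.sorted2 p (fun pt => pt.2) (fun pt => -pt.1)) 0 (0, 0)

-- ===== PRECONDITION & SPEC =====
-- Pre_ excludes only the empty list, on which Python A raises IndexError (p[0]) — B's [0] raises there too.
def Pre_getRightmostLowestPoint (p : List (Int × Int)) : Prop := p ≠ []
instance (p : List (Int × Int)) : Decidable (Pre_getRightmostLowestPoint p) := by unfold Pre_getRightmostLowestPoint; infer_instance
def pvWitness_getRightmostLowestPoint : (List (Int × Int)) := [(1, 2), (3, 2), (0, 5)]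
def Spec_getRightmostLowestPoint (p : List (Int × Int)) (out : Int × Int) : Prop := out = getRightmostLowestPoint_alt p
instance (p : List (Int × Int)) (out : Int × Int) : Decidable (Spec_getRightmostLowestPoint p out) := by unfold Spec_getRightmostLowestPoint; infer_instance

-- ===== CLAIM (what is proved, stated in full; the proofs are below) =====
def Claim_equal_getRightmostLowestPoint : Prop := ∀ (p : List (Int × Int)), Dom_getRightmostLowestPoint p → Pre_getRightmostLowestPoint p → Spec_getRightmostLowestPoint p (getRightmostLowestPoint p)

-- ===== LEMMAS AND PROOFS =====

-- A's selection rule as a binary fold function on points.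
def pvPick (m y : Int × Int) : Int × Int :=
  if m.2 > y.2 then y else if m.2 = y.2 ∧ m.1 < y.1 then y else m

-- A's indexed loop computes the pvPick-fold of the tail (invariant: the tracked (x, y) is p[idx]).
lemma pv_loopA (p : List (Int × Int)) :
    ∀ (k : Nat) (a idx x y : Int), PySem.List.len p - a = (k : Int) → 0 ≤ a →
      PySem.List.pyGetD p idx (0, 0) = (x, y) →
      PySem.List.pyGetD p (((PySem.List.pyRange a (PySem.List.len p)).foldl (pvStepA p) (idx, x, y)).1) (0, 0)
        = (p.drop a.toNat).foldl pvPick (x, y) := by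
  intro k
  induction k with
  | zero =>
    intro a idx x y hk ha hidx
    have hlen : PySem.List.len p = (p.length : Int) := rfl
    have ha' : (p.length : Int) ≤ a := by rw [hlen] at hk; omega
    rw [PySem.List.pyRange_one_eq_nil (by rw [hlen]; omega)]
    have : p.length ≤ a.toNat := by omega
    simp [List.drop_eq_nil_of_le this, hidx]
  | succ k ih =>
    intro a idx x y hk ha hidx
    have hlen : PySem.List.len p = (p.length : Int) := rfl
    have halt : a < (p.length : Int) := by rw [hlen] at hk; omega
    have hnat : a.toNat < p.length := by omega
    rw [PySem.List.pyRange_one_cons (by rw [hlen]; omega), List.foldl_cons]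
    have hget : PySem.List.pyGetD p a (0, 0) = p[a.toNat] :=
      PySem.List.pyGetD_eq_getElem p (0, 0) ha (by exact_mod_cast halt)
    have hdrop : p.drop a.toNat = p[a.toNat] :: p.drop (a.toNat + 1) :=
      List.drop_eq_getElem_cons hnat
    have ht1 : (a + 1).toNat = a.toNat + 1 := by omega
    have hk' : PySem.List.len p - (a + 1) = (k : Int) := by omega
    rw [hdrop, List.foldl_cons]
    show PySem.List.pyGetD p (((PySem.List.pyRange (a+1) (PySem.List.len p)).foldl (pvStepA p) (pvStepA p (idx, x, y) a)).1) (0,0)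
        = (p.drop (a.toNat + 1)).foldl pvPick (pvPick (x, y) p[a.toNat])
    rcases hpa : p[a.toNat] with ⟨px, py⟩
    by_cases h1 : y > py
    · have hst : pvStepA p (idx, x, y) a = (a, px, py) := by
        simp [pvStepA, hget, hpa, h1]
      have hpk : pvPick (x, y) (px, py) = (px, py) := by simp [pvPick, h1]
      rw [hst, hpk]
      have := ih (a + 1) a px py hk' (by omega) (by rw [hget, hpa])
      rwa [ht1] at this
    · by_cases h2 : y = py ∧ x < px
      · have hst : pvStepA p (idx, x, y) a = (a, px, y) := by
          simp [pvStepA, hget, hpa, h2.1, h2.2]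
        have hpk : pvPick (x, y) (px, py) = (px, y) := by
          simp [pvPick, h2.1, h2.2]
        rw [hst, hpk]
        have := ih (a + 1) a px y hk' (by omega) (by rw [hget, hpa, h2.1])
        rwa [ht1] at this
      · have hst : pvStepA p (idx, x, y) a = (idx, x, y) := by
          simp only [pvStepA, hget, hpa]
          rw [if_neg (by omega), if_neg (by exact h2)]
        have hpk : pvPick (x, y) (px, py) = (x, y) := by
          simp only [pvPick]
          rw [if_neg (by omega), if_neg (by exact h2)]
        rw [hst, hpk]
        have := ih (a + 1) idx x y hk' (by omega) hidx
        rwa [ht1] at this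

-- Head of the insertion-sort accumulator is the running minimum w.r.t. `before`.
lemma pv_head_insert_fold {α : Type} (before : α → α → Bool) :
    ∀ (t : List α) (m : α) (rest : List α),
      ∃ rest', t.foldl (fun acc y => PySem.List.insertBy before y acc) (m :: rest)
        = (t.foldl (fun m y => if before y m then y else m) m) :: rest' := by
  intro t
  induction t with
  | nil => intro m rest; exact ⟨rest, rfl⟩
  | cons y t' ih =>
    intro m rest
    rw [List.foldl_cons, List.foldl_cons]
    have hins : PySem.List.insertBy before y (m :: rest)
        = if before y m then y :: m :: rest else m :: PySem.List.insertBy before y rest := by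
      simp [PySem.List.insertBy]
    by_cases hb : before y m
    · rw [hins, if_pos hb, if_pos hb]; exact ih y (m :: rest)
    · rw [hins, if_neg hb, if_neg hb]; exact ih m (PySem.List.insertBy before y rest)

-- A's selection rule coincides with B's sort order on key (y, -x).
lemma pv_pick_eq (m y : Int × Int) :
    pvPick m y =
      if (decide (y.2 < m.2) || (!decide (m.2 < y.2) && decide (-y.1 < -m.1))) then y else m := by
  rcases m with ⟨mx, my⟩
  rcases y with ⟨yx, yy⟩
  simp only [pvPick, Bool.or_eq_true, Bool.and_eq_true, Bool.not_eq_eq_eq_not, Bool.not_true,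
    decide_eq_true_eq, decide_eq_false_iff_not]
  split_ifs with h1 h2 h3 h3 <;> first
    | rfl
    | (exfalso; omega)

-- ===== VERDICT (by name: the statement is the Claim_ definition above) =====
theorem getRightmostLowestPoint_spec : Claim_equal_getRightmostLowestPoint := by
  intro p _ hpre
  obtain ⟨h, t, rfl⟩ := List.exists_cons_of_ne_nil hpre
  unfold Spec_getRightmostLowestPoint
  -- A side
  have hA : getRightmostLowestPoint (h :: t) = t.foldl pvPick (h.1, h.2) := by
    have hget0 : PySem.List.pyGetD (h :: t) 0 (0, 0) = (h.1, h.2) := by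
      rw [PySem.List.pyGetD_eq_getElem (h :: t) (0, 0) le_rfl (by simp)]
      simp
    have := pv_loopA (h :: t) t.length 1 0 h.1 h.2
      (by simp [PySem.List.len]) (by omega) hget0
    simpa [getRightmostLowestPoint, hget0] using this
  -- B side
  have hB : getRightmostLowestPoint_alt (h :: t)
      = t.foldl (fun m y =>
          if (decide (y.2 < m.2) || (!decide (m.2 < y.2) && decide (-y.1 < -m.1))) then y else m) h := by
    simp only [getRightmostLowestPoint_alt, PySem.List.sorted2]
    simp only [if_neg (by decide : ¬ (false = true))]
    rw [List.foldl_cons]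
    have hins0 : PySem.List.insertBy
        (fun a b => decide (a.2 < b.2) || (!decide (b.2 < a.2) && decide (-a.1 < -b.1))) h [] = [h] := by
      simp [PySem.List.insertBy]
    rw [hins0]
    obtain ⟨rest', hr⟩ := pv_head_insert_fold (α := Int × Int)
      (fun a b => decide (a.2 < b.2) || (!decide (b.2 < a.2) && decide (-a.1 < -b.1))) t h []
    rw [hr]
    rw [PySem.List.pyGetD_eq_getElem _ (0, 0) le_rfl (by simp)]
    simp
  rw [hA, hB]
  have hfun : pvPick = (fun (m y : Int × Int) =>
      if (decide (y.2 < m.2) || (!decide (m.2 < y.2) && decide (-y.1 < -m.1))) then y else m) :=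
    funext fun m => funext fun y => pv_pick_eq m y
  rw [hfun]
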